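-- pv_equiv track=rewrite | github.com/eliyetres/lt2316-ht19-a2 | bert_model.py | create_segment_masks
-- ===== SOURCE A (Python) =====
-- def create_segment_masks(preprocessed_train_data, max_sent_len):
--     segment_masks = []
--     for sent in preprocessed_train_data:
--         sent_id = 0
--         sent_mask = []
--         for token in sent:
--             # append sent_id first, then check for SEP token
--             sent_mask.append(sent_id)
--             # when SEP token found, switch sent_id to 1, since new sentence is starting now
--             if token == '[SEP]':
--                 sent_id = 1
--         while len(sent_mask) < max_sent_len:
--             sent_mask.append(0)
--         segment_masks.append(sent_mask)
--     return segment_masks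
-- ===== SOURCE B (Python) =====
-- def create_segment_masks(preprocessed_train_data, max_sent_len):
--     out = []
--     for sent in preprocessed_train_data:
--         if '[SEP]' in sent:
--             pos = sent.index('[SEP]')
--             mask = [0] * (pos + 1) + [1] * (len(sent) - pos - 1)
--         else:
--             mask = [0] * len(sent)
--         pad = max_sent_len - len(sent)
--         if pad > 0:
--             mask += [0] * pad
--         out.append(mask)
--     return out
-- ===== Notes on version B (the rewrite author's own statement) =====
-- stated objective: simpler
-- what changed: Replaces the stateful per-token flag loop by finding the first '[SEP]' position once and constructing each mask directly from list multiplication, with padding computed as a single arithmetic difference instead of a while loop.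
import Mathlib
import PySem

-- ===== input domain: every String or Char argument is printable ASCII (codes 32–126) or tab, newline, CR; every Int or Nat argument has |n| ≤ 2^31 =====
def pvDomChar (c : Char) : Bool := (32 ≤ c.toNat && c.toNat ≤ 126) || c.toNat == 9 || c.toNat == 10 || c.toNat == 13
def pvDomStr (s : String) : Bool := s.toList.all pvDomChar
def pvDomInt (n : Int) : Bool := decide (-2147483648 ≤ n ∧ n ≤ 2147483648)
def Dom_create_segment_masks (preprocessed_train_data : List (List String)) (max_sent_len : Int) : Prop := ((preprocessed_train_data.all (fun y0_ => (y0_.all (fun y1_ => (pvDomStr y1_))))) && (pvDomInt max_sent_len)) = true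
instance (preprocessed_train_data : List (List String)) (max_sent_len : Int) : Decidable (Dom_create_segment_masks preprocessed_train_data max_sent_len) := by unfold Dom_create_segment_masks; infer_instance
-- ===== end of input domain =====

-- B replaces A's stateful per-token flag loop by locating the first '[SEP]' once and building each
-- mask from list replication, with the padding computed arithmetically instead of a while loop (simpler).

-- ===== PORT A =====
-- the body of A's inner per-token loop, step for step
def stepA (st : Int × List Int) (token : String) : Int × List Int :=
  let st' := (st.1, st.2 ++ [st.1])
  if token == "[SEP]" then (1, st'.2) else st'

-- the `while len(sent_mask) < max_sent_len: sent_mask.append(0)` loop, step for step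
def padWhileA (mask : List Int) (max_sent_len : Int) : List Int :=
  if h : (mask.length : Int) < max_sent_len then padWhileA (mask ++ [0]) max_sent_len else mask
termination_by (max_sent_len - mask.length).toNat
decreasing_by simp only [List.length_append, List.length_cons, List.length_nil]; omega

def create_segment_masks (preprocessed_train_data : List (List String)) (max_sent_len : Int) : List (List Int) :=
  preprocessed_train_data.foldl (fun segment_masks sent =>
    let st := sent.foldl stepA ((0 : Int), ([] : List Int))
    segment_masks ++ [padWhileA st.2 max_sent_len]) []

-- ===== PORT B =====
def maskB (sent : List String) : List Int :=
  match PySem.List.index? sent "[SEP]" with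
  | some pos => List.replicate (pos + 1) 0 ++ List.replicate (sent.length - pos - 1) 1
  | none => List.replicate sent.length 0

def create_segment_masks_alt (preprocessed_train_data : List (List String)) (max_sent_len : Int) : List (List Int) :=
  preprocessed_train_data.map (fun sent =>
    let mask := maskB sent
    let pad := max_sent_len - sent.length
    if pad > 0 then mask ++ List.replicate pad.toNat 0 else mask)

-- ===== PRECONDITION & SPEC =====
def Spec_create_segment_masks (preprocessed_train_data : List (List String)) (max_sent_len : Int) (out : List (List Int)) : Prop := out = create_segment_masks_alt preprocessed_train_data max_sent_len
instance (preprocessed_train_data : List (List String)) (max_sent_len : Int) (out : List (List Int)) : Decidable (Spec_create_segment_masks preprocessed_train_data max_sent_len out) := by unfold Spec_create_segment_masks; infer_instance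

-- ===== CLAIM (what is proved, stated in full; the proofs are below) =====
def Claim_equal_create_segment_masks : Prop := ∀ (preprocessed_train_data : List (List String)) (max_sent_len : Int), Dom_create_segment_masks preprocessed_train_data max_sent_len → Spec_create_segment_masks preprocessed_train_data max_sent_len (create_segment_masks preprocessed_train_data max_sent_len)

-- ===== LEMMAS AND PROOFS =====

-- the suffix generated by A's inner flag loop starting from sent_id = sid
def genA (sid : Int) (sent : List String) : List Int :=
  match sent with
  | [] => []
  | t :: ts => sid :: genA (if t == "[SEP]" then 1 else sid) ts

theorem innerA_eq (sent : List String) : ∀ (sid : Int) (acc : List Int),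
    (sent.foldl stepA (sid, acc)).2 = acc ++ genA sid sent := by
  induction sent with
  | nil => intro sid acc; simp [genA]
  | cons t ts ih =>
    intro sid acc
    by_cases h : t = "[SEP]"
    · rw [List.foldl_cons, show stepA (sid, acc) t = (1, acc ++ [sid]) by simp [stepA, h], ih]
      simp [genA, h]
    · rw [List.foldl_cons, show stepA (sid, acc) t = (sid, acc ++ [sid]) by simp [stepA, h], ih]
      simp [genA, h]

theorem genA_one (sent : List String) : genA 1 sent = List.replicate sent.length 1 := by
  induction sent with
  | nil => rfl
  | cons t ts ih => simp [genA, ih, List.replicate_succ]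

theorem genA_length (sid : Int) (sent : List String) : (genA sid sent).length = sent.length := by
  induction sent generalizing sid with
  | nil => rfl
  | cons t ts ih => simp [genA, ih]

theorem genA_zero_eq_maskB (sent : List String) : genA 0 sent = maskB sent := by
  induction sent with
  | nil => rfl
  | cons t ts ih =>
    by_cases h : t = "[SEP]"
    · subst h
      simp only [maskB, PySem.List.index?_cons_self]
      simp [genA, genA_one, List.replicate_succ]
    · have hidx := PySem.List.index?_cons_of_ne (xs := ts) (x := t) (v := "[SEP]") h
      have hne : (t == "[SEP]") = false := by simp [h]
      cases hp : PySem.List.index? ts "[SEP]" with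
      | none =>
        simp only [maskB, hidx, hp, Option.map_none]
        simp only [PySem.List.index?_eq_idxOf?] at hp
        simp [genA, hne, ih, maskB, hp, List.replicate_succ]
      | some pos =>
        simp only [maskB, hidx, hp, Option.map_some]
        simp only [PySem.List.index?_eq_idxOf?] at hp
        simp [genA, hne, ih, maskB, hp, List.replicate_succ, Nat.succ_sub_succ]

theorem padWhileA_eq (mask : List Int) (max_sent_len : Int) :
    padWhileA mask max_sent_len = mask ++ List.replicate (max_sent_len - mask.length).toNat 0 := by
  fun_induction padWhileA mask max_sent_len with
  | case1 mask h ih =>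
    rw [ih]
    have hk : (max_sent_len - mask.length).toNat = (max_sent_len - ((mask.length : Int) + 1)).toNat + 1 := by
      omega
    simp only [List.length_append, List.length_cons, List.length_nil, Nat.zero_add, Nat.cast_add,
      Nat.cast_one, hk, List.replicate_succ, List.append_assoc, List.cons_append, List.nil_append]
  | case2 mask h =>
    have hz : (max_sent_len - mask.length).toNat = 0 := by omega
    simp [hz]

theorem per_sentence (sent : List String) (max_sent_len : Int) :
    padWhileA (genA 0 sent) max_sent_len =
      (let mask := maskB sent
       let pad := max_sent_len - sent.length
       if pad > 0 then mask ++ List.replicate pad.toNat 0 else mask) := by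
  rw [padWhileA_eq, genA_length, genA_zero_eq_maskB]
  show maskB sent ++ List.replicate (max_sent_len - (sent.length : Int)).toNat 0 =
    if max_sent_len - (sent.length : Int) > 0 then
      maskB sent ++ List.replicate (max_sent_len - (sent.length : Int)).toNat 0
    else maskB sent
  split_ifs with h
  · rfl
  · have hz : (max_sent_len - (sent.length : Int)).toNat = 0 := by omega
    simp [hz]

theorem foldl_append_map {α β : Type} (g : α → β) (l : List α) (acc : List β) :
    l.foldl (fun acc x => acc ++ [g x]) acc = acc ++ l.map g := by
  induction l generalizing acc with
  | nil => simp
  | cons x xs ih => simp [ih]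

-- ===== VERDICT (by name: the statement is the Claim_ definition above) =====
theorem create_segment_masks_spec : Claim_equal_create_segment_masks := by
  intro data max_sent_len _
  unfold Spec_create_segment_masks create_segment_masks create_segment_masks_alt
  have hbody : ∀ sent : List String,
      padWhileA ((sent.foldl stepA ((0 : Int), ([] : List Int))).2) max_sent_len =
      (let mask := maskB sent
       let pad := max_sent_len - sent.length
       if pad > 0 then mask ++ List.replicate pad.toNat 0 else mask) := by
    intro sent
    rw [innerA_eq, List.nil_append, per_sentence]
  calc data.foldl (fun segment_masks sent =>
        let st := sent.foldl stepA ((0 : Int), ([] : List Int))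
        segment_masks ++ [padWhileA st.2 max_sent_len]) []
      = [] ++ data.map (fun sent =>
          padWhileA ((sent.foldl stepA ((0 : Int), ([] : List Int))).2) max_sent_len) :=
        foldl_append_map _ data []
    _ = _ := by simp only [List.nil_append]; exact List.map_congr_left (fun s _ => hbody s)
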